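-- pv_equiv track=rewrite | github.com/sudog1/Algorithm | 프로그래머스/lv2/42587. 프로세스/프로세스.py | solution
-- ===== SOURCE A (Python) =====
-- from collections import deque
--
-- def solution(priorities, location):
--     deq = deque(enumerate(priorities))
--     remain = sorted(priorities)
--     count = 0
--     while deq:
--         i, p = deq.popleft()
--         if p == remain[-1]:
--             count += 1
--             if i == location:
--                 return count
--             remain.pop()
--         else:
--             deq.append([i, p])
-- ===== SOURCE B (Python) =====
-- def solution(priorities, location):
--     q = list(enumerate(priorities))
--     count = 0
--     while q:
--         m = max(p for _, p in q)
--         j = next(k for k, (_, p) in enumerate(q) if p == m)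
--         count += 1
--         i, _ = q[j]
--         if i == location:
--             return count
--         q = q[j + 1:] + q[:j]
-- ===== Notes on version B (the rewrite author's own statement) =====
-- stated objective: alternative
-- what changed: B drops both the deque rotation and A's sorted 'remain' list: each iteration it finds the first maximal-priority item directly, prints it, and rotates the whole queue past it in one slicing step, so one B iteration does the work of many A iterations.
-- outside the precondition, e.g. on solution([1, 2], 5): A returns None, B returns None; on solution([], 0): A returns None, B returns None
import Mathlib
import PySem

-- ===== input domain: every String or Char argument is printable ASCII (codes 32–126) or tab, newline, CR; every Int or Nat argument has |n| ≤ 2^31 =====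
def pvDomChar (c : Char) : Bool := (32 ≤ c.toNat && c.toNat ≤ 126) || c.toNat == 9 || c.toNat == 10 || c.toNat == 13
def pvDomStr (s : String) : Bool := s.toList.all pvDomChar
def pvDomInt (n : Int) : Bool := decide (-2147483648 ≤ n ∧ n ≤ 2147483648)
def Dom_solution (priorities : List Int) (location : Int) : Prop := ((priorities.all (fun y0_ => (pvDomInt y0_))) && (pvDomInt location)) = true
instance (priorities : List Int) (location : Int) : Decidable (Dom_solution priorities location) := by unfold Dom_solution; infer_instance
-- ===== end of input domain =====

-- B replaces A's deque rotation + sorted `remain` list by a direct split: each iteration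
-- finds the first maximal-priority item, prints it, and rotates the queue past it in one step.


-- ===== PORT A =====
-- A's while-loop over (deq, remain, count); fuel (n+1)^2 bounds the ≤ n + n(n+1)/2 iterations
-- the loop can make before returning inside Pre_; the 0-defaults sit on the `return None`
-- fall-through and the remain[-1] IndexError, both unreachable inside Pre_.
def solutionLoopA (location : Int) : Nat → List (Int × Int) → List Int → Int → Int
  | 0, _, _, _ => 0
  | _ + 1, [], _, _ => 0
  | fuel + 1, (i, p) :: rest, remain, count =>
    match PySem.List.pyGet? remain (-1) with
    | none => 0
    | some m =>
      if p = m then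
        if i = location then count + 1
        else solutionLoopA location fuel rest remain.dropLast (count + 1)
      else solutionLoopA location fuel (rest ++ [(i, p)]) remain count

def solution (priorities : List Int) (location : Int) : Int :=
  solutionLoopA location ((priorities.length + 1) * (priorities.length + 1))
    (PySem.List.enumerate priorities 0) (PySem.List.sorted priorities (fun x => x) false) 0

-- ===== PORT B =====
-- B's while-loop over (q, count): find m = max(p for _, p in q), split q at the first item
-- with priority m (takeWhile/dropWhile = `next(k for …)` + the slices q[j+1:] / q[:j]),
-- print it, recurse on tail ++ prefix. Fuel n+1 bounds the ≤ n iterations (one item leaves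
-- the queue each time); the 0-defaults sit on the `return None` fall-through (out of fuel)
-- and the unreachable empty-max/empty-dropWhile cases.
def solutionLoopB (location : Int) : Nat → List (Int × Int) → Int → Int
  | 0, _, _ => 0
  | _ + 1, [], _ => 0
  | fuel + 1, h :: t, count =>
    match PySem.List.max? ((h :: t).map (·.2)) (fun y => y) with
    | none => 0
    | some m =>
      match (h :: t).dropWhile (fun x => !(x.2 == m)) with
      | [] => 0
      | (i, _) :: tail =>
        if i = location then count + 1
        else solutionLoopB location fuel (tail ++ (h :: t).takeWhile (fun x => !(x.2 == m))) (count + 1)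

def solution_alt (priorities : List Int) (location : Int) : Int :=
  solutionLoopB location (priorities.length + 1) (PySem.List.enumerate priorities 0) 0

-- ===== PRECONDITION & SPEC =====
-- Pre_ excludes locations outside [0, len(priorities)): there both Pythons' loops drain and
-- fall through returning None (not an int).
def Pre_solution (priorities : List Int) (location : Int) : Prop :=
  0 ≤ location ∧ location < priorities.length
instance (priorities : List Int) (location : Int) : Decidable (Pre_solution priorities location) := by unfold Pre_solution; infer_instance
def pvWitness_solution : List Int × Int := ([2, 1, 3, 2], 2)

def Spec_solution (priorities : List Int) (location : Int) (out : Int) : Prop := out = solution_alt priorities location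
instance (priorities : List Int) (location : Int) (out : Int) : Decidable (Spec_solution priorities location out) := by unfold Spec_solution; infer_instance

-- ===== CLAIM (what is proved, stated in full; the proofs are below) =====
def Claim_equal_solution : Prop := ∀ (priorities : List Int) (location : Int), Dom_solution priorities location → Pre_solution priorities location → Spec_solution priorities location (solution priorities location)

-- ===== LEMMAS AND PROOFS =====

/-- In a `≤`-sorted list every element is at most the last one. -/
lemma le_getLast_of_pairwise {remain : List Int} (hs : remain.Pairwise (· ≤ ·))
    {x : Int} (hx : x ∈ remain) (h : remain ≠ []) : x ≤ remain.getLast h := by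
  induction remain with
  | nil => cases hx
  | cons a t ih =>
    rcases List.mem_cons.mp hx with rfl | hxt
    · cases t with
      | nil => simp [List.getLast]
      | cons b u =>
        have := (List.pairwise_cons.mp hs).1 _ (List.getLast_mem (l := b :: u) (by simp))
        simpa [List.getLast_cons] using this
    · have ht : t ≠ [] := List.ne_nil_of_mem hxt
      have := ih (List.pairwise_cons.mp hs).2 hxt ht
      simpa [List.getLast_cons ht] using this

/-- The head of a nonempty `dropWhile` fails the predicate. -/
lemma dropWhile_head_false {α : Type} (p : α → Bool) :
    ∀ (l : List α) (y : α) (ys : List α), l.dropWhile p = y :: ys → p y = false := by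
  intro l
  induction l with
  | nil => intro y ys h; cases h
  | cons a t ih =>
    intro y ys h
    rw [List.dropWhile_cons] at h
    split at h
    · exact ih y ys h
    · cases h; simpa using ‹¬ p a = true›

/-- Items whose priority is below `remain`'s maximum get rotated to the back of A's queue. -/
lemma loopA_skip (location : Int) :
    ∀ (pre rest : List (Int × Int)) (remain : List Int) (count : Int) (fuel : Nat)
      (h : remain ≠ []),
      (∀ x ∈ pre, x.2 ≠ remain.getLast h) →
      solutionLoopA location (pre.length + fuel) (pre ++ rest) remain count
        = solutionLoopA location fuel (rest ++ pre) remain count := by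
  intro pre
  induction pre with
  | nil => intro rest remain count fuel h _; simp
  | cons x pre' ih =>
    intro rest remain count fuel h hx
    obtain ⟨i, p⟩ := x
    have hget : PySem.List.pyGet? remain (-1) = some (remain.getLast h) := by
      rw [PySem.List.pyGet?_neg_one, List.getLast?_eq_some_getLast h]
    have hne : p ≠ remain.getLast h := by
      simpa using hx (i, p) (by simp)
    have hstep : solutionLoopA location (pre'.length + fuel + 1) ((i, p) :: (pre' ++ rest))
        remain count
        = solutionLoopA location (pre'.length + fuel) ((pre' ++ rest) ++ [(i, p)]) remain count := by
      simp only [solutionLoopA, hget, if_neg hne]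
    have := ih (rest ++ [(i, p)]) remain count fuel h
      (fun y hy => hx y (List.mem_cons_of_mem _ hy))
    show solutionLoopA location (pre'.length + 1 + fuel) ((i, p) :: (pre' ++ rest)) remain count = _
    rw [show pre'.length + 1 + fuel = pre'.length + fuel + 1 from by omega, hstep,
        List.append_assoc, this]
    congr 1
    simp

/-- Main invariant: when `remain` is a sorted permutation of the queue's priorities and both
loops have enough fuel, A's rotate-one-at-a-time loop equals B's split-at-first-max loop. -/
lemma loop_eq (location : Int) :
    ∀ (fb : Nat) (q : List (Int × Int)) (remain : List Int) (count : Int) (fa : Nat),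
      remain.Pairwise (· ≤ ·) → remain.Perm (q.map (·.2)) →
      q.length * q.length + q.length < fa → q.length < fb →
      solutionLoopA location fa q remain count = solutionLoopB location fb q count := by
  intro fb
  induction fb with
  | zero => intro q _ _ _ _ _ hfa hfb; omega
  | succ fb ih =>
    intro q remain count fa hs hp hfa hfb
    match q with
    | [] =>
      obtain ⟨fa', rfl⟩ : ∃ fa', fa = fa' + 1 := ⟨fa - 1, by omega⟩
      rfl
    | (i₀, p₀) :: rest =>
      have hne : remain ≠ [] := by
        intro h; subst h; exact absurd hp.symm.eq_nil (by simp)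
      set m := remain.getLast hne with hm
      have hmmem : m ∈ p₀ :: rest.map (·.2) := hp.mem_iff.mp (List.getLast_mem hne)
      have hall : ∀ x ∈ remain, x ≤ m := fun x hx => le_getLast_of_pairwise hs hx hne
      -- B's max is m
      have hmm : PySem.List.max? (((i₀, p₀) :: rest).map (·.2)) (fun y => y)
          = some ((rest.map (·.2)).foldl max p₀) := by
        simp only [List.map_cons]
        exact PySem.List.max?_id_cons p₀ (rest.map (·.2))
      have h1 : (rest.map (·.2)).foldl max p₀ ≤ m :=
        hall _ (hp.mem_iff.mpr (by simpa using PySem.List.max?_mem hmm))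
      have h2 : m ≤ (rest.map (·.2)).foldl max p₀ := by
        simpa using PySem.List.max?_isMax hmm m (by simpa using hmmem)
      have hmax : PySem.List.max? (((i₀, p₀) :: rest).map (·.2)) (fun y => y) = some m := by
        rw [hmm, le_antisymm h1 h2]
      -- the first item of priority m exists
      have hdropne : ((i₀, p₀) :: rest).dropWhile (fun x => !(x.2 == m)) ≠ [] := by
        intro hnil
        have hall' := List.dropWhile_eq_nil_iff.mp hnil
        rcases List.mem_map.mp (show m ∈ ((i₀, p₀) :: rest).map (·.2) from by
          rw [List.map_cons]; exact hmmem) with ⟨x, hxmem, hx2⟩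
        have := hall' x hxmem
        simp [hx2] at this
      obtain ⟨⟨i, p⟩, tail, hdrop⟩ :
          ∃ y ys, ((i₀, p₀) :: rest).dropWhile (fun x => !(x.2 == m)) = y :: ys := by
        cases hd : ((i₀, p₀) :: rest).dropWhile (fun x => !(x.2 == m)) with
        | nil => exact absurd hd hdropne
        | cons y ys => exact ⟨y, ys, rfl⟩
      have hpm : p = m := by
        have := dropWhile_head_false (fun x : Int × Int => !(x.2 == m)) _ _ _ hdrop
        simpa using this
      have hsplit : ((i₀, p₀) :: rest).takeWhile (fun x => !(x.2 == m)) ++ (i, p) :: tail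
          = (i₀, p₀) :: rest := by
        rw [← hdrop]; exact List.takeWhile_append_dropWhile
      set pre : List (Int × Int) := ((i₀, p₀) :: rest).takeWhile (fun x => !(x.2 == m)) with hpre
      have hprelt : ∀ x ∈ pre, x.2 ≠ m := by
        intro x hx
        have := List.mem_takeWhile_imp hx
        simpa using this
      have hlen : pre.length + tail.length + 1 = ((i₀, p₀) :: rest).length := by
        rw [← hsplit]; simp; omega
      -- A: rotate `pre` to the back, then print (i, p) with p = m
      obtain ⟨fa', hfa'⟩ : ∃ fa', fa = pre.length + (fa' + 1) := by
        refine ⟨fa - pre.length - 1, ?_⟩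
        have hplt : pre.length < fa := by
          linarith [Nat.zero_le (((i₀, p₀) :: rest).length * ((i₀, p₀) :: rest).length), hlen, hfa]
        omega
      have hA : solutionLoopA location fa ((i₀, p₀) :: rest) remain count
          = solutionLoopA location (fa' + 1) ((i, p) :: (tail ++ pre)) remain count := by
        rw [hfa', ← hsplit]
        have := loopA_skip location pre ((i, p) :: tail) remain count (fa' + 1) hne
          (fun x hx => by rw [← hm]; exact hprelt x hx)
        rw [this]
        rfl
      have hget : PySem.List.pyGet? remain (-1) = some m := by
        rw [PySem.List.pyGet?_neg_one, List.getLast?_eq_some_getLast hne]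
      -- B: one step straight to the first max item
      have hB : solutionLoopB location (fb + 1) ((i₀, p₀) :: rest) count
          = if i = location then count + 1
            else solutionLoopB location fb (tail ++ pre) (count + 1) := by
        simp only [solutionLoopB, hmax, hdrop, hpre]
      rw [hA, hB]
      have hstepA : solutionLoopA location (fa' + 1) ((i, p) :: (tail ++ pre)) remain count
          = if i = location then count + 1
            else solutionLoopA location fa' (tail ++ pre) remain.dropLast (count + 1) := by
        simp only [solutionLoopA, hget, if_pos hpm]
      rw [hstepA]
      by_cases hil : i = location
      · simp [hil]
      · simp only [if_neg hil]
        -- permutation invariant for the shrunken queue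
        have hq0map : ((i₀, p₀) :: rest).map (·.2) = pre.map (·.2) ++ m :: tail.map (·.2) := by
          rw [← hsplit]; simp [hpm]
        have hp' : remain.Perm (pre.map (·.2) ++ m :: tail.map (·.2)) := by
          rw [← hq0map]; exact hp
        have hrem : remain.dropLast ++ [m] = remain := by
          simpa [hm] using List.dropLast_append_getLast hne
        have h3 : (m :: remain.dropLast).Perm (m :: (pre.map (·.2) ++ tail.map (·.2))) := by
          refine (List.perm_append_singleton m remain.dropLast).symm.trans ?_
          rw [hrem]
          exact hp'.trans List.perm_middle
        have hperm : remain.dropLast.Perm ((tail ++ pre).map (·.2)) := by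
          have := (List.perm_cons m).mp h3
          rw [List.map_append]
          exact this.trans List.perm_append_comm
        -- fuel arithmetic
        have hk : ((i₀, p₀) :: rest).length = pre.length + tail.length + 1 := hlen.symm
        have hl2 : (tail ++ pre).length = pre.length + tail.length := by simp; omega
        have hfa2 : (tail ++ pre).length * (tail ++ pre).length + (tail ++ pre).length < fa' := by
          have e : ((i₀, p₀) :: rest).length * ((i₀, p₀) :: rest).length + ((i₀, p₀) :: rest).length
              = (pre.length + tail.length) * (pre.length + tail.length)
                + 3 * (pre.length + tail.length) + 2 := by rw [hk]; ring
          rw [e] at hfa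
          rw [hl2]
          linarith [hfa, hfa']
        have hfb2 : (tail ++ pre).length < fb := by
          rw [hl2]
          have := hfb
          rw [hk] at this
          omega
        exact ih (tail ++ pre) remain.dropLast (count + 1) fa'
          (hs.sublist remain.dropLast_sublist) hperm hfa2 hfb2

-- ===== VERDICT (by name: the statement is the Claim_ definition above) =====
theorem solution_spec : Claim_equal_solution := by
  intro priorities location _ _
  show solution priorities location = solution_alt priorities location
  unfold solution solution_alt
  apply loop_eq
  · exact PySem.List.sorted_pairwise priorities (fun x => x)
  · rw [PySem.List.map_snd_enumerate]
    exact PySem.List.sorted_perm priorities (fun x => x) false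
  · rw [PySem.List.length_enumerate]; nlinarith [priorities.length.zero_le]
  · rw [PySem.List.length_enumerate]; omega
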